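-- pv_equiv track=rewrite | github.com/kishore-172/Entity_extraction_LLM | app.py | filter_helpful_columns
-- ===== SOURCE A (Python) =====
-- def filter_helpful_columns(columns):
--     # Define keywords or criteria indicative of helpful columns for analysis
--     keywords = ["id", "date", "amount", "name", "type", "status", "count", "total", "average"]
--
--     scored_columns = []
--     for col, desc in columns:
--         score = sum(1 for keyword in keywords if keyword in col.lower() or keyword in desc.lower())
--         scored_columns.append((col, desc, score))
--
--     # Sort columns by score in descending order and take the top N (e.g., top 5) most relevant columns
--     top_columns = sorted(scored_columns, key=lambda x: x[2], reverse=True)[:5]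
--     return [(col, desc) for col, desc, score in top_columns]
-- ===== SOURCE B (Python) =====
-- def filter_helpful_columns(columns):
--     # Same scoring; instead of sorting, bucket pairs by score (0..9) and read buckets high-to-low.
--     keywords = ["id", "date", "amount", "name", "type", "status", "count", "total", "average"]
--
--     buckets = {}
--     for col, desc in columns:
--         score = sum(1 for keyword in keywords if keyword in col.lower() or keyword in desc.lower())
--         buckets[score] = buckets.get(score, []) + [(col, desc)]
--
--     out = []
--     for s in range(9, -1, -1):
--         out = out + buckets.get(s, [])
--     return out[:5]
-- ===== Notes on version B (the rewrite author's own statement) =====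
-- stated objective: alternative
-- what changed: Replaces the comparison sort of scored triples by a score-keyed bucket table (scores are bounded by the 9 keywords) read from 9 down to 0, preserving original order inside each bucket; the sort disappears.
import Mathlib
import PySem

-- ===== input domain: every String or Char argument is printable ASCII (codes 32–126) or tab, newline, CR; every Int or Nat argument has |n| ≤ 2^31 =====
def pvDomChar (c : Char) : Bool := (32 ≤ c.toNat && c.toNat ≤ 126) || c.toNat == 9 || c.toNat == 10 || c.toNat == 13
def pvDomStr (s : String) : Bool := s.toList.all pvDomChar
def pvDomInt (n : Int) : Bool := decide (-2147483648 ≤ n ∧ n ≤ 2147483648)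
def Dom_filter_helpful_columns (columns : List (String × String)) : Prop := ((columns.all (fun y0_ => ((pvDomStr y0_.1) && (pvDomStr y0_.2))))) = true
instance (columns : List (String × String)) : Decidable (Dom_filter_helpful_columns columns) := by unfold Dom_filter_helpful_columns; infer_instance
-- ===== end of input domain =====

-- B replaces the comparison sort by a score-keyed bucket table read from score 9 down to 0 (alternative decomposition, same results).

-- ===== PORT A =====
def pvKeywords : List String := ["id", "date", "amount", "name", "type", "status", "count", "total", "average"]

-- score = sum(1 for keyword in keywords if keyword in col.lower() or keyword in desc.lower())  (shared by both Pythons verbatim)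
def pvScore (col desc : String) : Int :=
  ((pvKeywords.filter (fun k =>
      PySem.Str.isIn k (PySem.Str.lower col) || PySem.Str.isIn k (PySem.Str.lower desc))).map
    (fun _ => (1 : Int))).sum

def filter_helpful_columns (columns : List (String × String)) : List (String × String) :=
  let scored := columns.foldl (fun acc p => acc ++ [(p.1, p.2, pvScore p.1 p.2)]) []
  let top := PySem.List.slice (PySem.List.sorted scored (fun x => x.2.2) true) none (some 5)
  top.map (fun x => (x.1, x.2.1))

-- ===== PORT B =====
def filter_helpful_columns_alt (columns : List (String × String)) : List (String × String) :=
  let buckets := columns.foldl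
    (fun (d : PySem.Dict Int (List (String × String))) p =>
      let score := pvScore p.1 p.2
      d.insert score (d.getD score [] ++ [(p.1, p.2)]))
    PySem.Dict.empty
  let out := (PySem.List.pyRange 9 (-1) (-1)).foldl (fun acc s => acc ++ buckets.getD s []) []
  PySem.List.slice out none (some 5)

-- ===== PRECONDITION & SPEC =====
def Spec_filter_helpful_columns (columns : List (String × String)) (out : List (String × String)) : Prop := out = filter_helpful_columns_alt columns
instance (columns : List (String × String)) (out : List (String × String)) : Decidable (Spec_filter_helpful_columns columns out) := by unfold Spec_filter_helpful_columns; infer_instance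

-- ===== CLAIM (what is proved, stated in full; the proofs are below) =====
def Claim_equal_filter_helpful_columns : Prop := ∀ (columns : List (String × String)), Dom_filter_helpful_columns columns → Spec_filter_helpful_columns columns (filter_helpful_columns columns)

-- ===== LEMMAS AND PROOFS =====

theorem insertBy_nil {α : Type} (before : α → α → Bool) (x : α) :
    PySem.List.insertBy before x [] = [x] := by
  simp [PySem.List.insertBy]

theorem insertBy_cons {α : Type} (before : α → α → Bool) (x y : α) (ys : List α) :
    PySem.List.insertBy before x (y :: ys) =
      if before x y then x :: y :: ys else y :: PySem.List.insertBy before x ys := by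
  simp [PySem.List.insertBy]

theorem insertBy_skip {α : Type} (before : α → α → Bool) (x : α) (l1 l2 : List α)
    (h : ∀ y ∈ l1, before x y = false) :
    PySem.List.insertBy before x (l1 ++ l2) = l1 ++ PySem.List.insertBy before x l2 := by
  induction l1 with
  | nil => simp
  | cons y ys ih =>
    have hy : before x y = false := h y (by simp)
    simp [insertBy_cons, hy, ih (fun z hz => h z (by simp [hz]))]

theorem insertBy_head {α : Type} (before : α → α → Bool) (x : α) (l : List α)
    (h : ∀ y ∈ l, before x y = true) :
    PySem.List.insertBy before x l = x :: l := by
  cases l with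
  | nil => simp [insertBy_nil]
  | cons y ys => simp [insertBy_cons, h y (by simp)]

theorem ins_flatten {α : Type} (key : α → Int) (vs : List Int) (hvs : vs.Pairwise (· > ·))
    (x : α) (hx : key x ∈ vs) (xs : List α) :
    PySem.List.insertBy (fun a b => decide (key b < key a)) x
        ((vs.map (fun v => xs.filter (fun y => key y == v))).flatten)
      = (vs.map (fun v => (xs ++ [x]).filter (fun y => key y == v))).flatten := by
  induction vs with
  | nil => cases hx
  | cons v vs' ih =>
    rw [List.pairwise_cons] at hvs
    obtain ⟨hv, hvs'⟩ := hvs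
    have hkeymem : ∀ (v0 : Int) (y : α), y ∈ xs.filter (fun y => key y == v0) → key y = v0 := by
      intro v0 y hy
      have := (List.mem_filter.mp hy).2
      exact beq_iff_eq.mp this
    by_cases hxv : key x = v
    · -- x falls in the first bucket (after its old members); all later buckets unchanged
      have hrest : ∀ v' ∈ vs', (xs ++ [x]).filter (fun y => key y == v') = xs.filter (fun y => key y == v') := by
        intro v' hv'
        have : (key x == v') = false := by
          have := hv v' hv'
          simp only [beq_eq_false_iff_ne, ne_eq]
          omega
        simp [List.filter_append, this]
      have hfirst : (xs ++ [x]).filter (fun y => key y == v) = xs.filter (fun y => key y == v) ++ [x] := by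
        simp [List.filter_append, hxv]
      simp only [List.map_cons, List.flatten_cons]
      rw [insertBy_skip _ x _ _ (by
        intro y hy
        have := hkeymem v y hy
        simp [this, hxv])]
      rw [insertBy_head _ x _ (by
        intro y hy
        simp only [List.mem_flatten, List.mem_map] at hy
        obtain ⟨l, ⟨v', hv', rfl⟩, hyl⟩ := hy
        have h1 := hkeymem v' y hyl
        have h2 := hv v' hv'
        simp only [decide_eq_true_eq]
        omega)]
      rw [hfirst]
      have : (vs'.map fun v' => (xs ++ [x]).filter (fun y => key y == v')) =
             (vs'.map fun v' => xs.filter (fun y => key y == v')) :=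
        List.map_congr_left (fun v' hv' => hrest v' hv')
      rw [this]
      simp
    · -- x belongs to a later bucket
      have hx' : key x ∈ vs' := by
        rcases List.mem_cons.mp hx with h | h
        · exact absurd h hxv
        · exact h
      have hxlt : key x < v := hv _ hx'
      have hfirst : (xs ++ [x]).filter (fun y => key y == v) = xs.filter (fun y => key y == v) := by
        have : (key x == v) = false := by simp [beq_eq_false_iff_ne, hxv]
        simp [List.filter_append, this]
      simp only [List.map_cons, List.flatten_cons]
      rw [insertBy_skip _ x _ _ (by
        intro y hy
        have := hkeymem v y hy
        simp only [decide_eq_false_iff_not, not_lt, this]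
        omega)]
      rw [ih hvs' hx', hfirst]

theorem sorted_eq_buckets {α : Type} (key : α → Int) (vs : List Int) (hvs : vs.Pairwise (· > ·))
    (xs : List α) (hxs : ∀ x ∈ xs, key x ∈ vs) :
    PySem.List.sorted xs key true = (vs.map (fun v => xs.filter (fun y => key y == v))).flatten := by
  rw [PySem.List.sorted_rev_eq_foldl_insertBy]
  induction xs using List.reverseRecOn with
  | nil => simp
  | append_singleton xs x ih =>
    rw [List.foldl_append, List.foldl_cons, List.foldl_nil]
    rw [ih (fun y hy => hxs y (by simp [hy]))]
    exact ins_flatten key vs hvs x (hxs x (by simp)) xs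

def pvVs9 : List Int := [9, 8, 7, 6, 5, 4, 3, 2, 1, 0]

theorem pvScore_mem_vs9 (col desc : String) : pvScore col desc ∈ pvVs9 := by
  have hlen : (pvKeywords.filter (fun k =>
      PySem.Str.isIn k (PySem.Str.lower col) || PySem.Str.isIn k (PySem.Str.lower desc))).length ≤ 9 := by
    have := List.length_filter_le (fun k =>
      PySem.Str.isIn k (PySem.Str.lower col) || PySem.Str.isIn k (PySem.Str.lower desc)) pvKeywords
    simpa [pvKeywords] using this
  have hsum : ∀ (l : List String), ((l.map (fun _ => (1 : Int))).sum) = (l.length : Int) := by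
    intro l; induction l with
    | nil => simp
    | cons a t ih => simp; omega
  have h : pvScore col desc = ((pvKeywords.filter (fun k =>
      PySem.Str.isIn k (PySem.Str.lower col) || PySem.Str.isIn k (PySem.Str.lower desc))).length : Int) := by
    simp [pvScore]
  rw [h]
  simp only [pvVs9, List.mem_cons, List.not_mem_nil, or_false]
  omega

theorem buckets_getD (cols : List (String × String)) (d : PySem.Dict Int (List (String × String))) (s : Int) :
    (cols.foldl
      (fun (d : PySem.Dict Int (List (String × String))) p =>
        let score := pvScore p.1 p.2
        d.insert score (d.getD score [] ++ [(p.1, p.2)])) d).getD s []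
    = d.getD s [] ++ cols.filter (fun p => pvScore p.1 p.2 == s) := by
  induction cols generalizing d with
  | nil => simp
  | cons c t ih =>
    rw [List.foldl_cons, ih]
    by_cases h : pvScore c.1 c.2 = s
    · simp [h]
    · have hb : (pvScore c.1 c.2 == s) = false := by simp [beq_eq_false_iff_ne, h]
      simp [PySem.Dict.getD_insert, Ne.symm h, hb]

theorem foldl_append_gen {α β : Type} (l : List α) (g : α → List β) (a : List β) :
    l.foldl (fun acc v => acc ++ g v) a = a ++ (l.map g).flatten := by
  induction l generalizing a with
  | nil => simp
  | cons v t ih => simp [ih, List.append_assoc]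

theorem pyRange_9_down : PySem.List.pyRange 9 (-1) (-1) = pvVs9 := by decide

theorem main_eq (columns : List (String × String)) :
    filter_helpful_columns columns = filter_helpful_columns_alt columns := by
  unfold filter_helpful_columns filter_helpful_columns_alt
  simp only []
  -- A's scored list is a map
  have hscored : columns.foldl (fun acc p => acc ++ [(p.1, p.2, pvScore p.1 p.2)]) ([] : List (String × String × Int))
      = columns.map (fun p => (p.1, p.2, pvScore p.1 p.2)) := by
    rw [PySem.List.foldl_append_singleton_eq_map]; simp
  rw [hscored]
  -- A's sorted list in bucket form
  have hsortbuck := sorted_eq_buckets (fun x : String × String × Int => x.2.2) pvVs9 (by decide)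
    (columns.map (fun p => (p.1, p.2, pvScore p.1 p.2)))
    (by intro x hx; obtain ⟨p, _, rfl⟩ := List.mem_map.mp hx; exact pvScore_mem_vs9 p.1 p.2)
  rw [hsortbuck]
  -- B's out in bucket form
  rw [pyRange_9_down, foldl_append_gen]
  have hbucket : ∀ v : Int,
      (PySem.Dict.getD (columns.foldl
        (fun (d : PySem.Dict Int (List (String × String))) p =>
          let score := pvScore p.1 p.2
          d.insert score (d.getD score [] ++ [(p.1, p.2)])) PySem.Dict.empty) v [])
      = columns.filter (fun p => pvScore p.1 p.2 == v) := by
    intro v; rw [buckets_getD]; simp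
  have hmapb : (pvVs9.map fun v => PySem.Dict.getD (columns.foldl
        (fun (d : PySem.Dict Int (List (String × String))) p =>
          let score := pvScore p.1 p.2
          d.insert score (d.getD score [] ++ [(p.1, p.2)])) PySem.Dict.empty) v [])
      = pvVs9.map fun v => columns.filter (fun p => pvScore p.1 p.2 == v) :=
    List.map_congr_left (fun v _ => hbucket v)
  rw [hmapb]
  -- per-bucket: A's bucket is B's bucket mapped through the scoring triple
  have hfil : ∀ v : Int,
      (columns.map (fun p => (p.1, p.2, pvScore p.1 p.2))).filter (fun y => y.2.2 == v)
      = (columns.filter (fun p => pvScore p.1 p.2 == v)).map (fun p => (p.1, p.2, pvScore p.1 p.2)) := by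
    intro v; rw [List.filter_map]; rfl
  have hmapa : (pvVs9.map fun v =>
        (columns.map (fun p => (p.1, p.2, pvScore p.1 p.2))).filter (fun y => y.2.2 == v))
      = (pvVs9.map fun v => columns.filter (fun p => pvScore p.1 p.2 == v)).map
          (List.map (fun p => (p.1, p.2, pvScore p.1 p.2))) := by
    rw [List.map_map]; exact List.map_congr_left (fun v _ => hfil v)
  rw [hmapa, ← List.map_flatten]
  rw [PySem.List.slice_to _ (by norm_num), PySem.List.slice_to _ (by norm_num),
      ← List.map_take, List.map_map]
  simp [Function.comp_def]

-- ===== VERDICT (by name: the statement is the Claim_ definition above) =====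
theorem filter_helpful_columns_spec : Claim_equal_filter_helpful_columns := by
  intro columns _
  unfold Spec_filter_helpful_columns
  exact main_eq columns
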